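-- pv_equiv track=rewrite | github.com/great-expectations/great_expectations | great_expectations/rule_based_profiler/data_assistant_result/data_assistant_result.py | _get_column_set_text
-- ===== SOURCE A (Python) =====
-- from typing import (
--     TYPE_CHECKING,
--     Any,
--     Callable,
--     Dict,
--     Iterable,
--     KeysView,
--     List,
--     Optional,
--     Set,
--     Union,
-- )
--
-- def _get_column_set_text(column_set: List[str]) -> tuple[str, int]:
--     dy: int
--     if len(column_set) > 50:  # noqa: PLR2004
--         text = f"All batches have the same set of columns. The number of columns ({len(column_set)}) is too long to list here."
--         dy = 0
--     else:
--         column_set_text: str = ""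
--         idx: int = 1
--         for column in column_set:
--             # line break for every 4 column names
--             if idx % 4 == 0:
--                 column_set_text += f"{column},$"
--             else:
--                 column_set_text += f"{column}, "
--             idx += 1
--         text = f"All batches have columns matching the set:${column_set_text[:-2]}."
--         dy = -100
--     return text, dy
-- ===== SOURCE B (Python) =====
-- def _get_column_set_text(column_set):
--     if len(column_set) > 50:
--         text = f"All batches have the same set of columns. The number of columns ({len(column_set)}) is too long to list here."
--         dy = 0
--     else:
--         chunks = []
--         rest = column_set
--         while rest:
--             chunks.append(rest[:4])
--             rest = rest[4:]
--         column_set_text = ",$".join(", ".join(chunk) for chunk in chunks)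
--         text = f"All batches have columns matching the set:${column_set_text}."
--         dy = -100
--     return text, dy
-- ===== Notes on version B (the rewrite author's own statement) =====
-- stated objective: simpler
-- what changed: Replaces A's per-element loop with a 1-based counter, modulo-4 separator choice and a final [:-2] trim by a chunk-then-join decomposition: split the list into groups of 4 and join with ', ' inside a group and ',$' between groups, so no trailing separator ever needs trimming.
import Mathlib
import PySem

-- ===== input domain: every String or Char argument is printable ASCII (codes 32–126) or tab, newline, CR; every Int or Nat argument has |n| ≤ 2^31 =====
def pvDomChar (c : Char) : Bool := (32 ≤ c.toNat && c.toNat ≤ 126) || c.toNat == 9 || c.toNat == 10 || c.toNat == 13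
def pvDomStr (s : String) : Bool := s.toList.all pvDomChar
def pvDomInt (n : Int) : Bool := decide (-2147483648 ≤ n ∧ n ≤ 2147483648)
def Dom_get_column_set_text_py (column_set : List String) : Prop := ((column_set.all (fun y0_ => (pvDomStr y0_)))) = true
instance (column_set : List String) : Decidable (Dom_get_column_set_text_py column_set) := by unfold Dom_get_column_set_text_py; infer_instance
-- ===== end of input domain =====

-- B replaces A's flat per-element loop with modulo-selected separator and final [:-2] trim
-- by a chunk-then-join decomposition (groups of 4, ", " inside a group, ",$" between groups);
-- objective: simpler, same output byte for byte.

-- ===== PORT A =====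
-- the for-loop of A: state = (idx, column_set_text); strings handled on the List Char side
def pyA_loop : List (List Char) → Nat → List Char → List Char
  | [], _, acc => acc
  | c :: rest, idx, acc =>
      if idx % 4 == 0 then pyA_loop rest (idx + 1) (acc ++ c ++ [',', '$'])
      else pyA_loop rest (idx + 1) (acc ++ c ++ [',', ' '])

def get_column_set_text_py (column_set : List String) : String × Int :=
  if column_set.length > 50 then
    (String.ofList ("All batches have the same set of columns. The number of columns (".toList
      ++ PySem.Int.toChars (column_set.length : Int) ++ ") is too long to list here.".toList), 0)
  else
    let column_set_text := pyA_loop (column_set.map String.toList) 1 []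
    (String.ofList ("All batches have columns matching the set:$".toList
      ++ PySem.List.slice column_set_text none (some (-2)) ++ ['.']), -100)

-- ===== PORT B =====
-- the while-loop of Source B: chunks of rest[:4], recursing on rest[4:]
def chunk4 (l : List (List Char)) : List (List (List Char)) :=
  if hnil : l = [] then []
  else PySem.List.slice l none (some 4) :: chunk4 (PySem.List.slice l (some 4) none)
termination_by l.length
decreasing_by
  rw [PySem.List.slice_from l (by norm_num : (0:Int) ≤ 4)]
  have : l.length ≠ 0 := fun h0 => hnil (List.eq_nil_of_length_eq_zero h0)
  simp; omega

def get_column_set_text_py_alt (column_set : List String) : String × Int :=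
  if column_set.length > 50 then
    (String.ofList ("All batches have the same set of columns. The number of columns (".toList
      ++ PySem.Int.toChars (column_set.length : Int) ++ ") is too long to list here.".toList), 0)
  else
    let chunks := chunk4 (column_set.map String.toList)
    let column_set_text := PySem.Chars.join [',', '$']
      (chunks.map (fun chunk => PySem.Chars.join [',', ' '] chunk))
    (String.ofList ("All batches have columns matching the set:$".toList
      ++ column_set_text ++ ['.']), -100)

-- ===== PRECONDITION & SPEC =====
def Spec_get_column_set_text_py (column_set : List String) (out : String × Int) : Prop := out = get_column_set_text_py_alt column_set
instance (column_set : List String) (out : String × Int) : Decidable (Spec_get_column_set_text_py column_set out) := by unfold Spec_get_column_set_text_py; infer_instance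

-- ===== CLAIM (what is proved, stated in full; the proofs are below) =====
def Claim_equal_get_column_set_text_py : Prop := ∀ (column_set : List String), Dom_get_column_set_text_py column_set → Spec_get_column_set_text_py column_set (get_column_set_text_py column_set)

-- ===== LEMMAS AND PROOFS =====

-- B's column_set_text, as a function of the char-level input
def joinB (L : List (List Char)) : List Char :=
  PySem.Chars.join [',', '$'] ((chunk4 L).map (fun chunk => PySem.Chars.join [',', ' '] chunk))

theorem chunk4_nil : chunk4 [] = [] := by unfold chunk4; simp

theorem chunk4_cons (x : List Char) (xs : List (List Char)) :
    chunk4 (x :: xs) = (x :: xs).take 4 :: chunk4 ((x :: xs).drop 4) := by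
  rw [chunk4]
  simp [PySem.List.slice_from (x :: xs) (by norm_num : (0:Int) ≤ 4),
        PySem.List.slice_to (x :: xs) (by norm_num : (0:Int) ≤ 4)]

theorem pyA_loop_acc (L : List (List Char)) (i : Nat) (acc : List Char) :
    pyA_loop L i acc = acc ++ pyA_loop L i [] := by
  induction L generalizing i acc with
  | nil => simp [pyA_loop]
  | cons c rest ih =>
    simp only [pyA_loop]
    by_cases h : i % 4 = 0 <;>
      simp [h, ih (i + 1) (c ++ [',', '$']), ih (i + 1) (c ++ [',', ' '])] <;>
      rw [ih (i + 1)] <;> simp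
theorem pyA_loop_period (L : List (List Char)) (i : Nat) (acc : List Char) :
    pyA_loop L (i + 4) acc = pyA_loop L i acc := by
  induction L generalizing i acc with
  | nil => simp [pyA_loop]
  | cons c rest ih =>
    simp only [pyA_loop, Nat.add_mod_right]
    by_cases h : i % 4 = 0 <;> simp [h, show i + 4 + 1 = i + 1 + 4 from by omega, ih]

theorem pyA_master (L : List (List Char)) (hne : L ≠ []) :
    pyA_loop L 1 [] = joinB L ++ (if L.length % 4 = 0 then [',', '$'] else [',', ' ']) := by
  induction L using chunk4.induct with
  | case1 => exact absurd rfl hne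
  | case2 l hne' ih =>
    rw [PySem.List.slice_from l (by norm_num : (0:Int) ≤ 4)] at ih
    obtain ⟨a, l1, rfl⟩ := List.exists_cons_of_ne_nil hne'
    match l1 with
    | [] =>
      simp [pyA_loop, joinB, chunk4_cons, chunk4_nil, PySem.Chars.join_singleton]
    | [b] =>
      simp [pyA_loop, joinB, chunk4_cons, chunk4_nil,
        PySem.Chars.join_singleton, PySem.Chars.join_cons_cons]
    | [b, c] =>
      simp [pyA_loop, joinB, chunk4_cons, chunk4_nil,
        PySem.Chars.join_singleton, PySem.Chars.join_cons_cons]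
    | b :: c :: d :: rest =>
      have hdrop : List.drop (Int.toNat 4) (a :: b :: c :: d :: rest) = rest := rfl
      rw [hdrop] at ih
      have hloop : pyA_loop (a :: b :: c :: d :: rest) 1 [] =
          a ++ [',', ' '] ++ b ++ [',', ' '] ++ c ++ [',', ' '] ++ d ++ [',', '$']
            ++ pyA_loop rest 1 [] := by
        simp only [pyA_loop]
        norm_num
        rw [show (5:Nat) = 1 + 4 from rfl, pyA_loop_period, pyA_loop_acc]
        simp
      have hg4 : PySem.Chars.join [',', ' '] [a, b, c, d] =
          a ++ [',', ' '] ++ b ++ [',', ' '] ++ c ++ [',', ' '] ++ d := by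
        simp [PySem.Chars.join_cons_cons, PySem.Chars.join_singleton]
      cases rest with
      | nil =>
        rw [hloop]
        simp [pyA_loop, joinB, chunk4_cons, chunk4_nil, PySem.Chars.join_singleton, hg4]
      | cons r0 rs =>
        have ih' := ih (by simp)
        obtain ⟨y, ys, hy⟩ : ∃ y ys, chunk4 (r0 :: rs) = y :: ys := by
          rw [chunk4_cons]; exact ⟨_, _, rfl⟩
        have hJ : joinB (a :: b :: c :: d :: r0 :: rs) =
            PySem.Chars.join [',', ' '] [a, b, c, d] ++ [',', '$'] ++ joinB (r0 :: rs) := by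
          unfold joinB
          rw [chunk4_cons,
              show (a :: b :: c :: d :: r0 :: rs).take 4 = [a, b, c, d] from rfl,
              show (a :: b :: c :: d :: r0 :: rs).drop 4 = r0 :: rs from rfl, hy,
              List.map_cons, List.map_cons, PySem.Chars.join_cons_cons, ← List.map_cons]
        have hsep : (if (a :: b :: c :: d :: r0 :: rs).length % 4 = 0
              then ([',', '$'] : List Char) else [',', ' ']) =
            (if (r0 :: rs).length % 4 = 0 then [',', '$'] else [',', ' ']) := by
          have h45 : (rs.length + 1 + 1 + 1 + 1 + 1) % 4 = (rs.length + 1) % 4 := by omega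
          simp only [List.length_cons, h45]
          rfl
        rw [hloop, ih', hJ, hg4, hsep]
        simp [List.append_assoc]

theorem text_eq (L : List (List Char)) :
    PySem.List.slice (pyA_loop L 1 []) none (some (-2)) = joinB L := by
  match L with
  | [] =>
    simp [pyA_loop, joinB, chunk4_nil, PySem.Chars.join_nil, PySem.List.slice]
  | x :: xs =>
    have hsep2 : (if (x :: xs).length % 4 = 0
        then ([',', '$'] : List Char) else [',', ' ']).length = 2 := by
      simp only [List.length_cons]
      by_cases hm : (xs.length + 1) % 4 = 0 <;> simp [hm]
    rw [pyA_master (x :: xs) (by simp), PySem.List.slice_to_neg_ofNat _ 2 (by norm_num),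
        List.length_append, hsep2, Nat.add_sub_cancel, List.take_left]

-- ===== VERDICT (by name: the statement is the Claim_ definition above) =====
theorem get_column_set_text_py_spec : Claim_equal_get_column_set_text_py := by
  intro column_set _
  unfold Spec_get_column_set_text_py get_column_set_text_py get_column_set_text_py_alt
  by_cases h : column_set.length > 50
  · simp [h]
  · simp only [h]
    simp [text_eq (column_set.map String.toList), joinB]
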